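-- pv_equiv track=rewrite | github.com/sxyseo/autoflow | autoflow/core/conflict.py | _determine_resource_conflict_severity
-- ===== SOURCE A (Python) =====
-- from enum import Enum
--
-- class ConflictSeverity(str, Enum):
--     """Severity level of a detected conflict."""
--
--     LOW = "low"
--     """Minor conflict, unlikely to cause issues"""
--
--     MEDIUM = "medium"
--     """Moderate conflict, may cause issues under certain conditions"""
--
--     HIGH = "high"
--     """Severe conflict, very likely to cause data corruption or failures"""
--
-- def _determine_resource_conflict_severity(resource: str) -> ConflictSeverity:
--     """
--     Determine the severity of a resource conflict.
--
--     Args: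
--         resource: Resource identifier (e.g., "database:primary")
--
--     Returns:
--         ConflictSeverity level
--     """
--     resource_lower = resource.lower()
--
--     # High severity: databases, critical services
--     if any(
--         keyword in resource_lower
--         for keyword in ["database", "db:", "storage", "s3:", "redis"]
--     ):
--         return ConflictSeverity.HIGH
--
--     # Medium severity: APIs, external services
--     if any(
--         keyword in resource_lower for keyword in ["api", "http", "https", "service"]
--     ):
--         return ConflictSeverity.MEDIUM
--
--     # Low severity: caches, queues
--     return ConflictSeverity.LOW
-- ===== SOURCE B (Python) =====
-- from enum import Enum
--
-- class ConflictSeverity(str, Enum):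
--     LOW = "low"
--     MEDIUM = "medium"
--     HIGH = "high"
--
-- # Each keyword carries a numeric rank; severity is the MAX rank over all matches
-- # (no priority-ordered scan, no early exit): order of entries is irrelevant.
-- _KEYWORD_RANK = [
--     ("api", 1), ("http", 1), ("https", 1), ("service", 1),
--     ("database", 2), ("db:", 2), ("storage", 2), ("s3:", 2), ("redis", 2),
-- ]
--
-- _BY_RANK = (ConflictSeverity.LOW, ConflictSeverity.MEDIUM, ConflictSeverity.HIGH)
--
-- def _determine_resource_conflict_severity(resource: str) -> ConflictSeverity:
--     resource_lower = resource.lower()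
--     rank = max((r for kw, r in _KEYWORD_RANK if kw in resource_lower), default=0)
--     return _BY_RANK[rank]
-- ===== Notes on version B (the rewrite author's own statement) =====
-- stated objective: alternative
-- what changed: Replaces A's two ordered short-circuit any() group scans by an order-independent exhaustive aggregation: each keyword has a numeric rank, B takes the max rank over ALL matching keywords and indexes the severity by it (group precedence becomes max, not scan order).
import Mathlib
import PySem

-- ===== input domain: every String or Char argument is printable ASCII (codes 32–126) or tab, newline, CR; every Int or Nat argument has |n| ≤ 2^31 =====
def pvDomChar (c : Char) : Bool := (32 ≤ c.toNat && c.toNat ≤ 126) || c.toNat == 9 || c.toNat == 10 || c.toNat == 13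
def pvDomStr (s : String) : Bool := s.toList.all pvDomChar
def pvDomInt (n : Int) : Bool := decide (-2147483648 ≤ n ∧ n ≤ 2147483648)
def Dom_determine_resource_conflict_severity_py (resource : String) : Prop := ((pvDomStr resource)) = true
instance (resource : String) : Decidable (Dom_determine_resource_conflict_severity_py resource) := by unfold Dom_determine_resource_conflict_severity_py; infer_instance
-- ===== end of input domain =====

-- B replaces A's ordered short-circuit group scans by an order-independent max-rank
-- aggregation over all matching keywords (alternative decomposition; same cost).
-- ===== PORT A =====
def determine_resource_conflict_severity_py (resource : String) : String :=
  let resource_lower := PySem.Str.lower resource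
  if ["database", "db:", "storage", "s3:", "redis"].any
      (fun keyword => PySem.Str.isIn keyword resource_lower) then
    "high"
  else if ["api", "http", "https", "service"].any
      (fun keyword => PySem.Str.isIn keyword resource_lower) then
    "medium"
  else
    "low"

-- ===== PORT B =====
def pvKeywordRank : List (String × Nat) :=
  [("api", 1), ("http", 1), ("https", 1), ("service", 1),
   ("database", 2), ("db:", 2), ("storage", 2), ("s3:", 2), ("redis", 2)]

def pvByRank : List String := ["low", "medium", "high"]

def determine_resource_conflict_severity_py_alt (resource : String) : String :=
  let resource_lower := PySem.Str.lower resource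
  let rank := pvKeywordRank.foldl
    (fun acc p => if PySem.Str.isIn p.1 resource_lower then max acc p.2 else acc) 0
  pvByRank.getD rank "low"

-- ===== PRECONDITION & SPEC =====
def Spec_determine_resource_conflict_severity_py (resource : String) (out : String) : Prop := out = determine_resource_conflict_severity_py_alt resource
instance (resource : String) (out : String) : Decidable (Spec_determine_resource_conflict_severity_py resource out) := by unfold Spec_determine_resource_conflict_severity_py; infer_instance

-- ===== CLAIM (what is proved, stated in full; the proofs are below) =====
def Claim_equal_determine_resource_conflict_severity_py : Prop := ∀ (resource : String), Dom_determine_resource_conflict_severity_py resource → Spec_determine_resource_conflict_severity_py resource (determine_resource_conflict_severity_py resource)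

-- ===== LEMMAS AND PROOFS =====

-- ===== VERDICT (by name: the statement is the Claim_ definition above) =====
theorem determine_resource_conflict_severity_py_spec : Claim_equal_determine_resource_conflict_severity_py := by
  intro resource _
  unfold Spec_determine_resource_conflict_severity_py
  simp only [determine_resource_conflict_severity_py,
    determine_resource_conflict_severity_py_alt, pvKeywordRank, pvByRank,
    List.any_cons, List.any_nil, Bool.or_false, List.foldl]
  generalize PySem.Str.lower resource = rl
  cases PySem.Str.isIn "database" rl <;>
    cases PySem.Str.isIn "db:" rl <;>
    cases PySem.Str.isIn "storage" rl <;>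
    cases PySem.Str.isIn "s3:" rl <;>
    cases PySem.Str.isIn "redis" rl <;>
    cases PySem.Str.isIn "api" rl <;>
    cases PySem.Str.isIn "http" rl <;>
    cases PySem.Str.isIn "https" rl <;>
    cases PySem.Str.isIn "service" rl <;>
    rfl
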